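-- pv_equiv track=rewrite | github.com/Yueidhhgw83774-AI-CSPM/pkutechCSPM_Test | models/mcp_models/source/conftest.py | _extract_test_id
-- ===== SOURCE A (Python) =====
-- def _extract_test_id(test_name: str) -> str:
--     """テストメソッド名からテストIDを抽出する。"""
--     if "mcp_" in test_name.lower():
--         parts = test_name.split("_")
--         for i, part in enumerate(parts):
--             if part.lower() == "mcp" and i + 1 < len(parts):
--                 num = parts[i+1]
--                 if num.isdigit():
--                     return f"MCP-{num.zfill(3)}"
--     return test_name
-- ===== SOURCE B (Python) =====
-- def _extract_test_id(test_name: str) -> str: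
--     """Character-level state machine: one pass over the raw characters, never
--     building the token list; tracks the previous token and the current buffer."""
--     prev = None
--     cur = ""
--     for ch in test_name + "_":          # trailing sentinel closes the final token
--         if ch == "_":
--             if prev is not None and prev.lower() == "mcp" and cur.isdigit():
--                 return "MCP-" + cur.zfill(3)
--             prev, cur = cur, ""
--         else:
--             cur += ch
--     return test_name
-- ===== Notes on version B (the rewrite author's own statement) =====
-- stated objective: alternative
-- what changed: Replaces split plus an indexed scan over the token list by a single character-level state machine over the raw string (with a trailing sentinel separator) that never builds the token list, tracking only the previous token and the current buffer.
import Mathlib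
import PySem

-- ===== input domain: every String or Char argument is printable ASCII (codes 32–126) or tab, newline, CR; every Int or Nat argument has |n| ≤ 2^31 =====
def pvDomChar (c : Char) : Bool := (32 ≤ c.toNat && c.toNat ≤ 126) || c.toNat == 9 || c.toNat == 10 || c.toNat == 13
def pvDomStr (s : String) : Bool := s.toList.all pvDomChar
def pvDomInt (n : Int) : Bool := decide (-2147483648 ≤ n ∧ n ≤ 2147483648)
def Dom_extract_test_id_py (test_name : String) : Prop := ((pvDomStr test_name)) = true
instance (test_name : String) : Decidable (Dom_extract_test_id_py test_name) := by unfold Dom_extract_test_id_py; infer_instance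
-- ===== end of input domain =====

-- B replaces A's split + indexed token scan by a one-pass character-level
-- state machine over the raw string (objective: alternative).


-- ===== PORT A =====
-- the 'for i, part in enumerate(parts)' loop; parts[i+1] is read with pyGet? —
-- exact, because the branch guarantees i+1 < len(parts), so pyGet? is some there.
def pvLoopA (parts : List String) : List (Int × String) → Option String
  | [] => none
  | (i, part) :: rest =>
      if PySem.Str.lower part = "mcp" ∧ i + 1 < (parts.length : Int) then
        let num := (PySem.List.pyGet? parts (i + 1)).getD ""
        if PySem.Str.strIsdigit num then some ("MCP-" ++ PySem.Str.zfill num 3)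
        else pvLoopA parts rest
      else pvLoopA parts rest

def extract_test_id_py (test_name : String) : String :=
  if PySem.Str.isIn "mcp_" (PySem.Str.lower test_name) then
    -- split? is some because the separator "_" is non-empty (exact)
    let parts := (PySem.Str.split? test_name "_").getD []
    match pvLoopA parts (PySem.List.enumerate parts 0) with
    | some r => r
    | none => test_name
  else test_name

-- ===== PORT B =====
-- Source B's character loop over test_name + "_": prev is the previous token
-- (None before the first boundary), cur the buffer of the current token.
def pvScanB : List Char → Option (List Char) → List Char → Option (List Char)
  | [], _, _ => none
  | c :: rest, prev, cur =>
      if c = '_' then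
        match prev with
        | some p =>
            if PySem.Chars.lower p = "mcp".toList ∧ PySem.Chars.strIsdigit cur then
              some ("MCP-".toList ++ PySem.Chars.zfill cur 3)
            else pvScanB rest (some cur) []
        | none => pvScanB rest (some cur) []
      else pvScanB rest prev (cur ++ [c])

def extract_test_id_py_alt (test_name : String) : String :=
  match pvScanB (test_name.toList ++ ['_']) none [] with
  | some r => String.ofList r
  | none => test_name

-- ===== PRECONDITION & SPEC =====
def Spec_extract_test_id_py (test_name : String) (out : String) : Prop := out = extract_test_id_py_alt test_name
instance (test_name : String) (out : String) : Decidable (Spec_extract_test_id_py test_name out) := by unfold Spec_extract_test_id_py; infer_instance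

-- ===== CLAIM (what is proved, stated in full; the proofs are below) =====
def Claim_equal_extract_test_id_py : Prop := ∀ (test_name : String), Dom_extract_test_id_py test_name → Spec_extract_test_id_py test_name (extract_test_id_py test_name)

-- ===== LEMMAS AND PROOFS =====

-- proof-only helper: the pairwise scan over adjacent tokens, at the Char level
def pvPairC : List (List Char) → Option (List Char)
  | a :: b :: rest =>
      if PySem.Chars.lower a = "mcp".toList ∧ PySem.Chars.strIsdigit b then
        some ("MCP-".toList ++ PySem.Chars.zfill b 3)
      else pvPairC (b :: rest)
  | _ => none

-- proof-only helper: the same pairwise scan at the String level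
def pvLoopB : List (String × String) → Option String
  | [] => none
  | (part, nxt) :: rest =>
      if PySem.Str.lower part = "mcp" ∧ PySem.Str.strIsdigit nxt then
        some ("MCP-" ++ PySem.Str.zfill nxt 3)
      else pvLoopB rest

-- proof-only helper: structural split on '_'
def pvSplit1 : List Char → List (List Char)
  | [] => [[]]
  | c :: r =>
      if c = '_' then [] :: pvSplit1 r
      else match pvSplit1 r with
           | h :: t => (c :: h) :: t
           | [] => [[c]]

theorem pvSplit1_ne_nil (l : List Char) : pvSplit1 l ≠ [] := by
  cases l with
  | nil => simp [pvSplit1]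
  | cons c r =>
    simp only [pvSplit1]
    split_ifs
    · simp
    · cases h : pvSplit1 r <;> simp

-- splitOn.go computed against pvSplit1
theorem pvGo_eq : ∀ (fuel : Nat) (l cur : List Char) (acc : List (List Char)),
    l.length < fuel →
    PySem.Chars.splitOn.go ['_'] fuel l cur acc =
      acc.reverse ++ (cur.reverse ++ (pvSplit1 l).headI) :: (pvSplit1 l).tail := by
  intro fuel
  induction fuel with
  | zero => intro l cur acc h; omega
  | succ f ih =>
    intro l cur acc h
    cases l with
    | nil =>
      rw [PySem.Chars.splitOn.go]
      · simp [pvSplit1]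
      · omega
    | cons c rest =>
      rw [PySem.Chars.splitOn.go]
      by_cases hc : c = '_'
      · have hp : (['_'] : List Char).isPrefixOf (c :: rest) = true := by
          simp [hc, List.isPrefixOf]
        rw [if_pos hp]
        simp only [List.length_cons] at h
        rw [ih _ _ _ (by simp; omega)]
        subst hc
        obtain ⟨h1, t1, hsp⟩ := List.exists_cons_of_ne_nil (pvSplit1_ne_nil rest)
        simp [pvSplit1, hsp]
      · have hp : (['_'] : List Char).isPrefixOf (c :: rest) = false := by
          simp [List.isPrefixOf]
          exact fun he => absurd he.symm hc
        rw [if_neg (by simp [hp])]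
        simp only [List.length_cons] at h
        rw [ih _ _ _ (by omega)]
        obtain ⟨h1, t1, hsp⟩ := List.exists_cons_of_ne_nil (pvSplit1_ne_nil rest)
        simp [pvSplit1, hc, hsp]

theorem pvSplitOn_eq (l : List Char) : PySem.Chars.splitOn l ['_'] = pvSplit1 l := by
  rw [PySem.Chars.splitOn, pvGo_eq (l.length + 1) l [] [] (by omega)]
  obtain ⟨h1, t1, hsp⟩ := List.exists_cons_of_ne_nil (pvSplit1_ne_nil l)
  simp [hsp]

-- unfolding equations (definitional)
theorem pvScanB_us (rest : List Char) (prev : Option (List Char)) (cur : List Char) :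
    pvScanB ('_' :: rest) prev cur =
      (match prev with
       | some p =>
           if PySem.Chars.lower p = "mcp".toList ∧ PySem.Chars.strIsdigit cur then
             some ("MCP-".toList ++ PySem.Chars.zfill cur 3)
           else pvScanB rest (some cur) []
       | none => pvScanB rest (some cur) []) := rfl

theorem pvPairC_cons (a b : List Char) (rest : List (List Char)) :
    pvPairC (a :: b :: rest) =
      (if PySem.Chars.lower a = "mcp".toList ∧ PySem.Chars.strIsdigit b then
        some ("MCP-".toList ++ PySem.Chars.zfill b 3)
      else pvPairC (b :: rest)) := rfl

-- the state machine computed against the pairwise scan over pvSplit1's tokens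
theorem pvScan_eq : ∀ (l : List Char) (prev : Option (List Char)) (cur : List Char),
    pvScanB (l ++ ['_']) prev cur =
      pvPairC ((match prev with
                | some p => [p]
                | none => []) ++ (cur ++ (pvSplit1 l).headI) :: (pvSplit1 l).tail) := by
  intro l
  induction l with
  | nil =>
    intro prev cur
    cases prev with
    | none => simp [pvScanB, pvSplit1, pvPairC]
    | some p =>
      rw [List.nil_append, pvScanB_us]
      simp only [pvSplit1, List.headI, List.tail, List.append_nil, List.singleton_append]
      rw [pvPairC_cons]
      split_ifs with hcond
      · rfl
      · simp [pvScanB, pvPairC]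
  | cons c r ih =>
    intro prev cur
    obtain ⟨h1, t1, hsp⟩ := List.exists_cons_of_ne_nil (pvSplit1_ne_nil r)
    by_cases hc : c = '_'
    · subst hc
      rw [List.cons_append, pvScanB_us]
      cases prev with
      | none =>
        rw [ih (some cur) []]
        simp [pvSplit1, hsp]
      | some p =>
        simp only []
        split_ifs with hcond
        · simp [pvSplit1, hsp, pvPairC_cons, hcond]
        · rw [ih (some cur) []]
          simp [pvSplit1, hsp, pvPairC_cons]
          intro ha hb
          exact absurd ⟨ha, hb⟩ hcond
    · rw [List.cons_append, show pvScanB (c :: (r ++ ['_'])) prev cur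
          = pvScanB (r ++ ['_']) prev (cur ++ [c]) from by simp [pvScanB, hc],
        ih prev (cur ++ [c])]
      simp [pvSplit1, hc, hsp]

-- String-level pairwise scan equals the Char-level one through the ofList map
theorem pvLoopB_eq_pairC : ∀ (cps : List (List Char)),
    pvLoopB ((cps.map String.ofList).zip ((cps.map String.ofList).drop 1)) =
      (pvPairC cps).map String.ofList := by
  intro cps
  match cps with
  | [] => simp [pvLoopB, pvPairC]
  | [a] => simp [pvLoopB, pvPairC]
  | a :: b :: rest =>
    simp only [List.map_cons, List.drop_succ_cons, List.drop_zero, List.zip_cons_cons,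
      pvLoopB, pvPairC]
    have hlow : (PySem.Str.lower (String.ofList a) = "mcp") ↔
        (PySem.Chars.lower a = "mcp".toList) := by
      constructor
      · intro h
        have := congrArg String.toList h
        rwa [PySem.Str.toList_lower, String.toList_ofList] at this
      · intro h
        apply String.toList_inj.mp
        rw [PySem.Str.toList_lower, String.toList_ofList, h]
    have hdig : PySem.Str.strIsdigit (String.ofList b) = PySem.Chars.strIsdigit b := by
      rw [PySem.Str.strIsdigit_eq, String.toList_ofList]
    by_cases hcond : PySem.Chars.lower a = "mcp".toList ∧ PySem.Chars.strIsdigit b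
    · rw [if_pos hcond, if_pos ⟨hlow.mpr hcond.1, by rw [hdig]; exact hcond.2⟩]
      simp only [Option.map_some]
      congr 1
      apply String.toList_inj.mp
      simp [String.toList_append, PySem.Str.toList_zfill]
    · rw [if_neg hcond, if_neg (by
        intro hc
        exact hcond ⟨hlow.mp hc.1, by rw [← hdig]; exact hc.2⟩)]
      have := pvLoopB_eq_pairC (b :: rest)
      simpa using this

-- the two loops of port A agree with the String pairwise scan on every suffix
theorem pvLoopAB (n : Nat) : ∀ (parts : List String) (k : Nat), parts.length - k = n →
    pvLoopA parts (PySem.List.enumerate (parts.drop k) (k : Int)) =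
    pvLoopB ((parts.drop k).zip (parts.drop (k + 1))) := by
  induction n with
  | zero =>
    intro parts k hk
    have h1 : parts.drop k = [] := List.drop_eq_nil_of_le (by omega)
    have h2 : parts.drop (k+1) = [] := List.drop_eq_nil_of_le (by omega)
    simp [h1, h2, pvLoopA, pvLoopB]
  | succ m ih =>
    intro parts k hk
    have hklt : k < parts.length := by omega
    rw [List.drop_eq_getElem_cons hklt, PySem.List.enumerate_cons]
    by_cases hk1 : k + 1 < parts.length
    · rw [List.drop_eq_getElem_cons hk1]
      have hnum : (PySem.List.pyGet? parts ((k : Int) + 1)).getD "" = parts[k+1] := by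
        have : ((k : Int) + 1) = ((k + 1 : Nat) : Int) := by push_cast; ring
        rw [this, PySem.List.pyGet?_natCast]
        simp [List.getElem?_eq_getElem hk1]
      by_cases hmcp : PySem.Str.lower parts[k] = "mcp"
      · by_cases hdig : PySem.Str.strIsdigit parts[k+1] = true
        · simp only [pvLoopA, pvLoopB, List.zip_cons_cons]
          rw [if_pos ⟨hmcp, by omega⟩, hnum, if_pos hdig, if_pos ⟨hmcp, hdig⟩]
        · simp only [pvLoopA, pvLoopB, List.zip_cons_cons]
          rw [if_pos ⟨hmcp, by omega⟩, hnum, if_neg hdig,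
            if_neg (fun hc => hdig hc.2), ← List.drop_eq_getElem_cons hk1]
          have : ((k : Int) + 1) = ((k + 1 : Nat) : Int) := by push_cast; ring
          rw [this]
          exact ih parts (k+1) (by omega)
      · simp only [pvLoopA, pvLoopB, List.zip_cons_cons]
        rw [if_neg (by simp [hmcp]), if_neg (by simp [hmcp]),
          ← List.drop_eq_getElem_cons hk1]
        have : ((k : Int) + 1) = ((k + 1 : Nat) : Int) := by push_cast; ring
        rw [this]
        exact ih parts (k+1) (by omega)
    · have h2 : parts.drop (k+1) = [] := List.drop_eq_nil_of_le (by omega)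
      simp only [h2, List.zip_nil_right, pvLoopB]
      rw [pvLoopA]
      rw [if_neg (by omega)]
      simp [pvLoopA]

-- a successful String-level scan exhibits an adjacent pair whose head lowers to "mcp"
theorem pvLoopB_some (r : String) : ∀ (xs : List String),
    pvLoopB (xs.zip (xs.drop 1)) = some r →
    ∃ l1 a b l2, xs = l1 ++ a :: b :: l2 ∧ PySem.Str.lower a = "mcp" := by
  intro xs
  induction xs with
  | nil => intro h; simp [pvLoopB] at h
  | cons x t ih =>
    cases t with
    | nil => intro h; simp [pvLoopB] at h
    | cons y t' =>
      intro h
      simp only [List.drop_succ_cons, List.drop_zero, List.zip_cons_cons, pvLoopB] at h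
      by_cases hc : PySem.Str.lower x = "mcp" ∧ PySem.Str.strIsdigit y
      · exact ⟨[], x, y, t', rfl, hc.1⟩
      · rw [if_neg hc] at h
        obtain ⟨l1, a, b, l2, heq, hm⟩ := ih (by simpa using h)
        exact ⟨x :: l1, a, b, l2, by simp [heq], hm⟩

-- join of a cons through a separator, when the tail is non-empty
theorem pvJoin_cons (sep x : List Char) (xs : List (List Char)) (h : xs ≠ []) :
    PySem.Chars.join sep (x :: xs) = x ++ sep ++ PySem.Chars.join sep xs := by
  cases xs with
  | nil => exact absurd rfl h
  | cons y t => simp [PySem.Chars.join, List.intercalate, List.intersperse]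

-- fusing the last two pieces through the separator
theorem pvJoin_two (sep u v : List Char) (xs : List (List Char)) :
    PySem.Chars.join sep (xs ++ [u, v]) = PySem.Chars.join sep (xs ++ [u ++ sep ++ v]) := by
  induction xs with
  | nil =>
    rw [show ([] ++ [u, v] : List (List Char)) = u :: [v] by simp,
        pvJoin_cons sep u [v] (by simp)]
    simp [PySem.Chars.join, List.intercalate, List.intersperse]
  | cons x t ih =>
    rw [List.cons_append, List.cons_append,
        pvJoin_cons sep x (t ++ [u, v]) (by simp),
        pvJoin_cons sep x (t ++ [u ++ sep ++ v]) (by simp), ih]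

-- splitOn.go inverts to join
theorem pvJoin_go (sep : List Char) (hsep : sep ≠ []) : ∀ (fuel : Nat),
    ∀ (l cur : List Char) (acc : List (List Char)), l.length < fuel →
    PySem.Chars.join sep (PySem.Chars.splitOn.go sep fuel l cur acc) =
    PySem.Chars.join sep (acc.reverse ++ [cur.reverse ++ l]) := by
  intro fuel
  induction fuel with
  | zero => intro l cur acc h; omega
  | succ f ih =>
    intro l cur acc h
    cases l with
    | nil =>
      rw [PySem.Chars.splitOn.go]
      · simp
      · omega
    | cons c rest =>
      rw [PySem.Chars.splitOn.go]
      by_cases hp : sep.isPrefixOf (c :: rest) = true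
      · rw [if_pos hp]
        have hlen : sep.length ≤ (c :: rest).length := (List.IsPrefix.length_le (List.isPrefixOf_iff_prefix.mp hp))
        have hlen1 : 1 ≤ sep.length := List.length_pos_of_ne_nil hsep
        rw [ih _ _ _ (by simp only [List.length_drop]; simp at h ⊢; omega)]
        rw [List.reverse_cons, List.reverse_nil]
        have hsplit : (c :: rest) = sep ++ (c :: rest).drop sep.length := by
          obtain ⟨t, ht⟩ := List.isPrefixOf_iff_prefix.mp hp
          conv_lhs => rw [← ht]
          rw [← ht]
          simp
        rw [show acc.reverse ++ [cur.reverse] ++ [[] ++ (c :: rest).drop sep.length]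
              = acc.reverse ++ [cur.reverse, (c :: rest).drop sep.length] by simp,
            pvJoin_two]
        conv_rhs => rw [hsplit]
        simp [List.append_assoc]
      · rw [if_neg hp]
        rw [ih _ _ _ (by simp at h ⊢; omega)]
        simp

theorem pvJoin_splitOn (sep s : List Char) (hsep : sep ≠ []) :
    PySem.Chars.join sep (PySem.Chars.splitOn s sep) = s := by
  rw [PySem.Chars.splitOn, pvJoin_go sep hsep _ _ _ _ (by omega)]
  simp [PySem.Chars.join, List.intercalate]

-- an adjacent pair's head, followed by the separator, is an infix of the join
theorem pvAdj_infix (sep a b : List Char) : ∀ (l1 l2 : List (List Char)),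
    (a ++ sep) <:+: PySem.Chars.join sep (l1 ++ a :: b :: l2) := by
  intro l1
  induction l1 with
  | nil =>
    intro l2
    rw [List.nil_append, pvJoin_cons sep a (b :: l2) (by simp)]
    exact ⟨[], PySem.Chars.join sep (b :: l2), by simp⟩
  | cons x t ih =>
    intro l2
    rw [List.cons_append, pvJoin_cons sep x (t ++ a :: b :: l2) (by simp)]
    exact (ih l2).trans (List.suffix_append _ _).isInfix

-- guard soundness: a successful String-level scan implies A's containment guard
theorem pvGuard (s : String) (r : String)
    (h : pvLoopB ((((PySem.Str.split? s "_").getD []).zip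
        (((PySem.Str.split? s "_").getD []).drop 1))) = some r) :
    PySem.Str.isIn "mcp_" (PySem.Str.lower s) = true := by
  have hsp : (PySem.Str.split? s "_").getD []
      = (PySem.Chars.splitOn s.toList ['_']).map String.ofList := by
    simp [PySem.Str.split?, PySem.Chars.split?]
  rw [hsp] at h
  obtain ⟨l1, a, b, l2, heq, hm⟩ := pvLoopB_some r _ h
  obtain ⟨cl1, rest1, hc1, hmap1, hrest1⟩ := List.map_eq_append_iff.mp heq
  obtain ⟨ca, rest2, hc2, ha, hrest2⟩ := List.map_eq_cons_iff.mp hrest1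
  obtain ⟨cb, cl2, hc3, hb, hcl2⟩ := List.map_eq_cons_iff.mp hrest2
  have hparts : PySem.Chars.splitOn s.toList ['_'] = cl1 ++ ca :: cb :: cl2 := by
    rw [hc1, hc2, hc3]
  have hinf : (ca ++ ['_']) <:+: s.toList := by
    have := pvAdj_infix ['_'] ca cb cl1 cl2
    rw [← hparts, pvJoin_splitOn ['_'] s.toList (by simp)] at this
    exact this
  have hlow : PySem.Chars.lower ca = "mcp".toList := by
    have := congrArg String.toList hm
    rw [PySem.Str.toList_lower, ← ha] at this
    simpa using this
  have hinf2 : PySem.Chars.lower (ca ++ ['_']) <:+: PySem.Chars.lower s.toList :=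
    List.IsInfix.map _ hinf
  rw [PySem.Str.isIn_iff_infix, PySem.Str.toList_lower]
  have : PySem.Chars.lower (ca ++ ['_']) = "mcp_".toList := by
    simp only [PySem.Chars.lower, List.map_append] at hlow ⊢
    rw [hlow]
    rfl
  rwa [this] at hinf2

-- B's state machine over the raw characters equals the Char-level pairwise scan
theorem pvScanB_eq_pairC (s : String) :
    pvScanB (s.toList ++ ['_']) none [] = pvPairC (pvSplit1 s.toList) := by
  rw [pvScan_eq s.toList none []]
  obtain ⟨h1, t1, hsp⟩ := List.exists_cons_of_ne_nil (pvSplit1_ne_nil s.toList)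
  simp [hsp]

-- ===== VERDICT (by name: the statement is the Claim_ definition above) =====
theorem extract_test_id_py_spec : Claim_equal_extract_test_id_py := by
  intro s _
  unfold Spec_extract_test_id_py
  have hsp : (PySem.Str.split? s "_").getD []
      = (pvSplit1 s.toList).map String.ofList := by
    rw [← pvSplitOn_eq]
    simp [PySem.Str.split?, PySem.Chars.split?]
  have hchain : pvLoopA ((PySem.Str.split? s "_").getD [])
        (PySem.List.enumerate ((PySem.Str.split? s "_").getD []) 0)
      = (pvPairC (pvSplit1 s.toList)).map String.ofList := by
    have h1 := pvLoopAB ((PySem.Str.split? s "_").getD []).length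
        ((PySem.Str.split? s "_").getD []) 0 (by omega)
    simp only [List.drop_zero, Nat.cast_zero, zero_add, List.drop_one] at h1
    rw [h1, hsp]
    have h2 := pvLoopB_eq_pairC (pvSplit1 s.toList)
    rw [List.drop_one] at h2
    exact h2
  by_cases h : PySem.Str.isIn "mcp_" (PySem.Str.lower s) = true
  · simp only [extract_test_id_py, extract_test_id_py_alt, if_pos h, hchain,
      pvScanB_eq_pairC]
    cases pvPairC (pvSplit1 s.toList) <;> simp
  · cases hB : pvScanB (s.toList ++ ['_']) none [] with
    | none =>
      rw [extract_test_id_py, if_neg h, extract_test_id_py_alt, hB]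
    | some r =>
      exfalso
      apply h
      apply pvGuard s (String.ofList r)
      have hz : (((PySem.Str.split? s "_").getD []).zip
            (((PySem.Str.split? s "_").getD []).drop 1))
          = (((pvSplit1 s.toList).map String.ofList).zip
            (((pvSplit1 s.toList).map String.ofList).drop 1)) := by rw [hsp]
      rw [hz, pvLoopB_eq_pairC, ← pvScanB_eq_pairC, hB]
      rfl
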